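-- pv_equiv track=rewrite | github.com/ermongroup/WikipediaPovertyMapping | article_processing_modules/sequester_coordinate_articles.py | extract_hyperlinks
-- ===== SOURCE A (Python) =====
-- def extract_hyperlinks(text):
--
--     hyperlinks = set()
--     index = 0
--
--     # Iterate through whole article
--     while index < len(text):
--
--         # If a letter is '['
--         if text[index] == "[":
--             # If the letter following it is also '[', then it is a hyperlink
--             if index + 1 < len(text) and text[index + 1] == "[":
--
--                 # Build hyperlink
--                 index += 2
--                 link = ""
--                 while index < len(text) and not text[index] == "]" and not text[index] == "|":
--                     link += text[index]
--                     index += 1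
--                 hyperlinks.add(link)
--
--         index += 1
--
--     # Sort to make searchable via binary search
--     hyperlinks = list(hyperlinks)
--     hyperlinks.sort()
--
--     return hyperlinks
-- ===== SOURCE B (Python) =====
-- def extract_hyperlinks(text):
--     links = set()
--     _, sep, rest = text.partition("[[")
--     while sep:
--         cut = len(rest)
--         for t in "]|":
--             f = rest.find(t)
--             if f != -1 and f < cut:
--                 cut = f
--         links.add(rest[:cut])
--         _, sep, rest = rest[cut + 1:].partition("[[")
--     return sorted(links)
-- ===== Notes on version B (the rewrite author's own statement) =====
-- stated objective: faster
-- what changed: Replaced A's character-by-character state machine (index loop building each link one char at a time into a set) with substring jumps: str.partition on the link opener locates each link start and str.find locates its end, slicing the link out whole, then one sorted(set) at the end.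
import Mathlib
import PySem

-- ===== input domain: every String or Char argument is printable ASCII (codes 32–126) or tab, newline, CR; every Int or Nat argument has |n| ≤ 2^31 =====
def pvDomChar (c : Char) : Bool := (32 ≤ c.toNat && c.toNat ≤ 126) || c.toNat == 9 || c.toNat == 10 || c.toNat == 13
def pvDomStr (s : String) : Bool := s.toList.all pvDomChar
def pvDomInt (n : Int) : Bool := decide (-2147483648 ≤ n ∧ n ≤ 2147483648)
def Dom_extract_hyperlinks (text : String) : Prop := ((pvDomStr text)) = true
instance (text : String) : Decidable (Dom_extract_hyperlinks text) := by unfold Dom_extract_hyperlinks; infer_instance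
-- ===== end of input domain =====

-- B replaces A's character-by-character state machine (an index loop that builds each link one
-- character at a time) with substring jumps: str.partition locates each link start and str.find
-- locates its end. Objective: faster (same O(n); constant factor measured).

-- ===== PORT A =====
-- inner while: append characters to link until ']' or '|' or end of text; returns (link, final index)
def pvBuildLink (cs : List Char) (i : Nat) (link : String) : String × Nat :=
  if h : i < cs.length then
    if cs[i] ≠ ']' ∧ cs[i] ≠ '|' then
      pvBuildLink cs (i + 1) (link.push cs[i])
    else (link, i)
  else (link, i)
termination_by cs.length - i

-- the inner while never moves the index backwards (cited by pvScanA's termination proof)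
theorem pvBuildLink_le (cs : List Char) (i : Nat) (link : String) :
    i ≤ (pvBuildLink cs i link).2 := by
  unfold pvBuildLink
  split
  · rename_i h
    split
    · have := pvBuildLink_le cs (i + 1) (link.push (cs[i]'h))
      omega
    · simp
  · simp
termination_by cs.length - i

-- outer while over the whole article
def pvScanA (cs : List Char) (index : Nat) (links : PySem.Set String) : PySem.Set String :=
  if h : index < cs.length then
    if cs[index] = '[' then
      if h2 : index + 1 < cs.length then
        if cs[index + 1] = '[' then
          let r := pvBuildLink cs (index + 2) ""
          pvScanA cs (r.2 + 1) (PySem.Set.add links r.1)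
        else pvScanA cs (index + 1) links
      else pvScanA cs (index + 1) links
    else pvScanA cs (index + 1) links
  else links
termination_by cs.length - index
decreasing_by
  · have := pvBuildLink_le cs (index + 2) ""; omega
  all_goals omega

def extract_hyperlinks (text : String) : List String :=
  PySem.List.sorted (pvScanA text.toList 0 PySem.Set.empty) (fun x => x) false

-- ===== PORT B =====
-- rest part of text.partition("[[") (text after the first "[["); none encodes sep == ""
def pvPartitionTail : List Char → Option (List Char)
  | [] => none
  | c :: cs => if c = '[' ∧ cs.head? = some '[' then some cs.tail else pvPartitionTail cs

-- rest.find(t) for a single character t, ported as findIdx? with -1 for absent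
def pvFind1 (rest : List Char) (t : Char) : Int :=
  match rest.findIdx? (· == t) with
  | some f => (f : Int)
  | none => -1

-- loop body of `for t in "]|": f = rest.find(t); if f != -1 and f < cut: cut = f`
def pvCutStep (rest : List Char) (cut : Nat) (t : Char) : Nat :=
  let f := pvFind1 rest t
  if f ≠ -1 ∧ f < (cut : Int) then f.toNat else cut

def pvCut (rest : List Char) : Nat :=
  [']', '|'].foldl (pvCutStep rest) rest.length

-- a successful partition consumes at least the two bracket characters (cited by pvScanB's termination)
theorem pvPartitionTail_len (cs r : List Char) (h : pvPartitionTail cs = some r) :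
    r.length + 2 ≤ cs.length := by
  induction cs with
  | nil => simp [pvPartitionTail] at h
  | cons c cs ih =>
    simp only [pvPartitionTail] at h
    split at h
    · rename_i hc
      obtain ⟨-, hh⟩ := hc
      cases cs with
      | nil => simp at hh
      | cons d ds => simp_all
    · have := ih h; simp; omega

-- `while sep:` loop of B
def pvScanB (rest : List Char) (links : PySem.Set String) : PySem.Set String :=
  let cut := pvCut rest
  let links' := PySem.Set.add links (String.ofList (rest.take cut))
  match h : pvPartitionTail (rest.drop (cut + 1)) with
  | some rest' => pvScanB rest' links'
  | none => links'
termination_by rest.length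
decreasing_by
  have h1 := pvPartitionTail_len _ _ h
  have h2 : (rest.drop (cut + 1)).length ≤ rest.length := by simp
  omega

def extract_hyperlinks_alt (text : String) : List String :=
  let links := match pvPartitionTail text.toList with
    | some rest => pvScanB rest PySem.Set.empty
    | none => PySem.Set.empty
  PySem.List.sorted links (fun x => x) false

-- ===== PRECONDITION & SPEC =====
def Spec_extract_hyperlinks (text : String) (out : List String) : Prop := out = extract_hyperlinks_alt text
instance (text : String) (out : List String) : Decidable (Spec_extract_hyperlinks text out) := by unfold Spec_extract_hyperlinks; infer_instance

-- ===== CLAIM (what is proved, stated in full; the proofs are below) =====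
def Claim_equal_extract_hyperlinks : Prop := ∀ (text : String), Dom_extract_hyperlinks text → Spec_extract_hyperlinks text (extract_hyperlinks text)

-- ===== LEMMAS AND PROOFS =====

-- the character predicate both programs keep link characters by: not ']' and not '|'
def pvP (c : Char) : Bool := !(c == ']' || c == '|')

-- A's inner while is: take the pvP-prefix of the remaining text, ending right after it
theorem pvBuildLink_eq (cs : List Char) (i : Nat) (link : String) :
    pvBuildLink cs i link =
      (String.ofList (link.toList ++ (cs.drop i).takeWhile pvP),
       i + ((cs.drop i).takeWhile pvP).length) := by
  unfold pvBuildLink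
  split
  · rename_i h
    rw [List.drop_eq_getElem_cons h, List.takeWhile_cons]
    split
    · rename_i hc
      have hp : pvP (cs[i]'h) = true := by simp [pvP]; tauto
      rw [pvBuildLink_eq cs (i + 1) (link.push (cs[i]'h))]
      simp only [hp, if_true, String.toList_push, List.append_assoc, List.singleton_append,
        List.length_cons]
      simp only [Prod.mk.injEq]
      exact ⟨trivial, by omega⟩
    · rename_i hc
      have hp : pvP (cs[i]'h) = false := by
        simp [pvP]; by_contra hx; simp at hx; exact hc ⟨hx.1, hx.2⟩
      simp [hp, String.ofList_toList]
  · rename_i h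
    have hd : cs.drop i = [] := List.drop_eq_nil_iff.mpr (by omega)
    simp [hd, String.ofList_toList]
termination_by cs.length - i

theorem pvCutStep_eq (rest : List Char) (cut : Nat) (t : Char) (hcut : cut ≤ rest.length) :
    pvCutStep rest cut t = min (rest.findIdx (· == t)) cut := by
  unfold pvCutStep pvFind1
  cases hf : rest.findIdx? (· == t) with
  | none =>
    have h := List.findIdx?_eq_none_iff_findIdx_eq.mp hf
    simp [h]; omega
  | some f =>
    have h := List.findIdx?_eq_some_iff_findIdx_eq.mp hf
    simp only []
    split
    · rename_i hc; simp at hc ⊢; omega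
    · rename_i hc; simp at hc ⊢; omega

theorem pvTakeWhile_len (cs : List Char) :
    (cs.takeWhile pvP).length = min (cs.findIdx (· == ']')) (cs.findIdx (· == '|')) := by
  induction cs with
  | nil => simp
  | cons c cs ih =>
    rw [List.takeWhile_cons, List.findIdx_cons, List.findIdx_cons]
    by_cases h1 : c = ']'
    · subst h1; simp [pvP]
    · by_cases h2 : c = '|'
      · subst h2; simp [pvP]
      · have hp : pvP c = true := by simp [pvP]; tauto
        simp only [hp, if_true, List.length_cons,
          show (c == ']') = false by simp [h1], show (c == '|') = false by simp [h2],
          Bool.cond_false]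
        omega

-- B's cut is the length of the pvP-prefix of rest
theorem pvCut_eq (rest : List Char) : pvCut rest = (rest.takeWhile pvP).length := by
  have h1 : rest.findIdx (· == ']') ≤ rest.length := List.findIdx_le_length
  have h2 : rest.findIdx (· == '|') ≤ rest.length := List.findIdx_le_length
  have e : pvCut rest = pvCutStep rest (pvCutStep rest rest.length ']') '|' := rfl
  rw [e, pvCutStep_eq rest rest.length ']' le_rfl,
    pvCutStep_eq rest _ '|' (by omega), pvTakeWhile_len]
  omega

-- B's whole computation, starting from an arbitrary remaining text
def pvB0 (cs : List Char) (links : PySem.Set String) : PySem.Set String :=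
  match pvPartitionTail cs with
  | some rest => pvScanB rest links
  | none => links

theorem pvScanB_eq (rest : List Char) (links : PySem.Set String) :
    pvScanB rest links =
      pvB0 (rest.drop (pvCut rest + 1))
        (PySem.Set.add links (String.ofList (rest.take (pvCut rest)))) := by
  rw [pvScanB]
  cases h : pvPartitionTail (rest.drop (pvCut rest + 1)) <;> simp [pvB0, h]

-- the main invariant: A's scan from position `index` equals B's computation on the rest of the text
theorem pvScan_eq (cs : List Char) (n : Nat) (index : Nat) (links : PySem.Set String)
    (hn : cs.length - index ≤ n) :
    pvScanA cs index links = pvB0 (cs.drop index) links := by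
  induction n generalizing index links with
  | zero =>
    rw [pvScanA, dif_neg (by omega)]
    have hd : cs.drop index = [] := List.drop_eq_nil_iff.mpr (by omega)
    simp [hd, pvB0, pvPartitionTail]
  | succ n ih =>
    by_cases h : index < cs.length
    · have hd : cs.drop index = cs[index] :: cs.drop (index + 1) := List.drop_eq_getElem_cons h
      rw [pvScanA, dif_pos h]
      by_cases hb : cs[index] = '['
      · rw [if_pos hb]
        by_cases h2 : index + 1 < cs.length
        · rw [dif_pos h2]
          have hd2 : cs.drop (index + 1) = cs[index + 1] :: cs.drop (index + 2) :=
            List.drop_eq_getElem_cons h2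
          by_cases hb2 : cs[index + 1] = '['
          · rw [if_pos hb2]
            have hpt : pvPartitionTail (cs.drop index) = some (cs.drop (index + 2)) := by
              rw [hd, pvPartitionTail, if_pos ⟨hb, by rw [hd2]; simp [hb2]⟩, hd2]
              simp
            rw [pvBuildLink_eq]
            simp only [String.toList_empty, List.nil_append]
            rw [ih (index + 2 + ((cs.drop (index + 2)).takeWhile pvP).length + 1) _ (by omega)]
            have hB : pvB0 (cs.drop index) links = pvScanB (cs.drop (index + 2)) links := by
              rw [pvB0, hpt]
            rw [hB, pvScanB_eq, pvCut_eq]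
            have htake : (cs.drop (index + 2)).take ((cs.drop (index + 2)).takeWhile pvP).length
                = (cs.drop (index + 2)).takeWhile pvP :=
              (List.prefix_iff_eq_take.mp (List.takeWhile_prefix _)).symm
            rw [htake, List.drop_drop]
            have e : index + 2 + (((cs.drop (index + 2)).takeWhile pvP).length + 1)
                = index + 2 + ((cs.drop (index + 2)).takeWhile pvP).length + 1 := by omega
            rw [e]
          · rw [if_neg hb2]
            rw [ih (index + 1) links (by omega), pvB0, pvB0]
            have hpt : pvPartitionTail (cs.drop index) = pvPartitionTail (cs.drop (index + 1)) := by
              rw [hd, pvPartitionTail,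
                if_neg (by
                  rintro ⟨-, hx⟩
                  rw [hd2] at hx; simp at hx
                  rw [List.getElem?_eq_getElem h2] at hx
                  exact hb2 (Option.some.inj hx))]
            rw [hpt]
        · rw [dif_neg h2]
          rw [ih (index + 1) links (by omega), pvB0, pvB0]
          have hd2 : cs.drop (index + 1) = [] := List.drop_eq_nil_iff.mpr (by omega)
          have hpt : pvPartitionTail (cs.drop index) = pvPartitionTail (cs.drop (index + 1)) := by
            rw [hd, pvPartitionTail, if_neg (by rintro ⟨-, hx⟩; rw [hd2] at hx; simp at hx)]
          rw [hpt]
      · rw [if_neg hb]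
        rw [ih (index + 1) links (by omega), pvB0, pvB0]
        have hpt : pvPartitionTail (cs.drop index) = pvPartitionTail (cs.drop (index + 1)) := by
          rw [hd, pvPartitionTail, if_neg (by simp [hb])]
        rw [hpt]
    · rw [pvScanA, dif_neg h]
      have hd : cs.drop index = [] := List.drop_eq_nil_iff.mpr (by omega)
      simp [hd, pvB0, pvPartitionTail]

-- ===== VERDICT (by name: the statement is the Claim_ definition above) =====
theorem extract_hyperlinks_spec : Claim_equal_extract_hyperlinks := by
  intro text _
  unfold Spec_extract_hyperlinks extract_hyperlinks extract_hyperlinks_alt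
  rw [pvScan_eq text.toList text.toList.length 0 _ (by omega)]
  simp [pvB0]
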